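-- pv_equiv track=rewrite | github.com/noemimotolese/esercizio1 | esercizio1_verifica.py | competizione_con_piu_giudici
-- ===== SOURCE A (Python) =====
-- def competizione_con_piu_giudici(tupla_competizioni):
--     max=0
--     chefMax=[]
--     piattoMax=[]
--     punteggioMax=[]
--     for chef, piatto, punteggio, giudici in tupla_competizioni:
--         if giudici>max:
--             max=giudici
--             chefMax=[chef]
--             piattoMax=[piatto]
--             punteggioMax=[punteggio]
--         elif giudici==max:
--             chefMax.append(chef)
--             piattoMax.append(piatto)
--             punteggioMax.append(punteggio)
--     return(chefMax, piattoMax, punteggioMax, max)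
-- ===== SOURCE B (Python) =====
-- def competizione_con_piu_giudici(tupla_competizioni):
--     m = max([0] + [giudici for (_, _, _, giudici) in tupla_competizioni])
--     chefMax = [chef for (chef, _, _, giudici) in tupla_competizioni if giudici == m]
--     piattoMax = [piatto for (_, piatto, _, giudici) in tupla_competizioni if giudici == m]
--     punteggioMax = [punteggio for (_, _, punteggio, giudici) in tupla_competizioni if giudici == m]
--     return (chefMax, piattoMax, punteggioMax, m)
-- ===== Notes on version B (the rewrite author's own statement) =====
-- stated objective: simpler
-- what changed: Replaces the one-pass accumulate-and-reset loop with a compute-max-then-filter decomposition: first fold the maximum giudici against a 0 baseline, then select the matching rows with comprehensions.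
import Mathlib
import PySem

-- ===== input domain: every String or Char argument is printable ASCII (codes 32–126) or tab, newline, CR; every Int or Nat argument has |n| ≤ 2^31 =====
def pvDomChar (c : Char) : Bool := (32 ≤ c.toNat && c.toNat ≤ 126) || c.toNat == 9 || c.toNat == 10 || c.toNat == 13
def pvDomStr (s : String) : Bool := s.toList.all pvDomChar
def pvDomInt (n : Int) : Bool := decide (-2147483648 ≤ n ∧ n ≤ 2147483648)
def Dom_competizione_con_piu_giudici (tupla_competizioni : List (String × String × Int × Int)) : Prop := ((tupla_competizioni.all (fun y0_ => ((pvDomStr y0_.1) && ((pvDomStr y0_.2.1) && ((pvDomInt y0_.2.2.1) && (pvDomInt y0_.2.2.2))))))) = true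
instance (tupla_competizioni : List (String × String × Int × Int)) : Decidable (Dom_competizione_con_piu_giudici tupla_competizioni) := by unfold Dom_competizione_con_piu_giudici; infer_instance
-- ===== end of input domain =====

-- B replaces A's one-pass accumulate-and-reset loop by a compute-max-then-filter decomposition (same O(n) cost, simpler).


-- ===== PORT A =====
-- one pass; state (max, chefMax, piattoMax, punteggioMax); reset on >, append on ==
def competizione_con_piu_giudici (tupla_competizioni : List (String × String × Int × Int)) : List String × List String × List Int × Int :=
  let st := tupla_competizioni.foldl
    (fun (st : Int × List String × List String × List Int) t =>
      let (m, chefMax, piattoMax, punteggioMax) := st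
      let (chef, piatto, punteggio, giudici) := t
      if giudici > m then (giudici, [chef], [piatto], [punteggio])
      else if giudici = m then (m, chefMax ++ [chef], piattoMax ++ [piatto], punteggioMax ++ [punteggio])
      else st)
    (0, [], [], [])
  (st.2.1, st.2.2.1, st.2.2.2, st.1)

-- ===== PORT B =====
-- compute m = max([0] + giudici), then three filter comprehensions
def competizione_con_piu_giudici_alt (tupla_competizioni : List (String × String × Int × Int)) : List String × List String × List Int × Int :=
  let m := (tupla_competizioni.map (fun t => t.2.2.2)).foldl max 0
  let chefMax := (tupla_competizioni.filter (fun t => t.2.2.2 = m)).map (fun t => t.1)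
  let piattoMax := (tupla_competizioni.filter (fun t => t.2.2.2 = m)).map (fun t => t.2.1)
  let punteggioMax := (tupla_competizioni.filter (fun t => t.2.2.2 = m)).map (fun t => t.2.2.1)
  (chefMax, piattoMax, punteggioMax, m)

-- ===== PRECONDITION & SPEC =====
def Spec_competizione_con_piu_giudici (tupla_competizioni : List (String × String × Int × Int)) (out : List String × List String × List Int × Int) : Prop := out = competizione_con_piu_giudici_alt tupla_competizioni
instance (tupla_competizioni : List (String × String × Int × Int)) (out : List String × List String × List Int × Int) : Decidable (Spec_competizione_con_piu_giudici tupla_competizioni out) := by unfold Spec_competizione_con_piu_giudici; infer_instance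

-- ===== CLAIM (what is proved, stated in full; the proofs are below) =====
def Claim_equal_competizione_con_piu_giudici : Prop := ∀ (tupla_competizioni : List (String × String × Int × Int)), Dom_competizione_con_piu_giudici tupla_competizioni → Spec_competizione_con_piu_giudici tupla_competizioni (competizione_con_piu_giudici tupla_competizioni)

-- ===== LEMMAS AND PROOFS =====

theorem pv_foldl_max_ge (xs : List Int) (m : Int) : xs.foldl max m ≥ m := by
  induction xs generalizing m with
  | nil => simp
  | cons x xx ih => simpa using le_trans (le_max_left m x) (ih (max m x))

-- A's loop from an arbitrary state (m0, cs, ps, ss): the final max is the fold of max over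
-- the giudici starting at m0, and the lists are the previous ones (kept iff no reset happened)
-- followed by the rows whose giudici equals the final max.
theorem pv_foldA_char (ts : List (String × String × Int × Int)) (m0 : Int)
    (cs ps : List String) (ss : List Int) :
    ts.foldl
      (fun (st : Int × List String × List String × List Int) t =>
        let (m, chefMax, piattoMax, punteggioMax) := st
        let (chef, piatto, punteggio, giudici) := t
        if giudici > m then (giudici, [chef], [piatto], [punteggio])
        else if giudici = m then (m, chefMax ++ [chef], piattoMax ++ [piatto], punteggioMax ++ [punteggio])
        else st)
      (m0, cs, ps, ss)
    = (let M := (ts.map (fun t => t.2.2.2)).foldl max m0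
       (M,
        (if M = m0 then cs else []) ++ (ts.filter (fun t => t.2.2.2 = M)).map (fun t => t.1),
        (if M = m0 then ps else []) ++ (ts.filter (fun t => t.2.2.2 = M)).map (fun t => t.2.1),
        (if M = m0 then ss else []) ++ (ts.filter (fun t => t.2.2.2 = M)).map (fun t => t.2.2.1))) := by
  induction ts generalizing m0 cs ps ss with
  | nil => simp
  | cons t rest ih =>
    obtain ⟨c, p, s, g⟩ := t
    by_cases hgt : g > m0
    · simp only [List.foldl_cons, if_pos hgt]
      rw [ih]
      have hmax : max m0 g = g := max_eq_right (le_of_lt hgt)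
      have hMg := pv_foldl_max_ge (rest.map (fun t => t.2.2.2)) g
      have h1 : ¬ ((rest.map (fun t => t.2.2.2)).foldl max g = m0) := by omega
      by_cases hgM : g = (rest.map (fun t => t.2.2.2)).foldl max g
      · have h2 : ¬ (g = m0) := by omega
        simp only [List.map_cons, List.foldl_cons, hmax, List.filter_cons]
        simp [← hgM, h2]
      · have h2 : ¬ ((rest.map (fun t => t.2.2.2)).foldl max g = g) := fun h => hgM h.symm
        simp only [List.map_cons, List.foldl_cons, hmax, List.filter_cons]
        simp [h1, hgM, h2]
    · by_cases heq : g = m0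
      · subst heq
        simp only [List.foldl_cons, if_neg hgt]
        rw [ih]
        by_cases hMm : (rest.map (fun t => t.2.2.2)).foldl max g = g
        · simp only [List.map_cons, List.foldl_cons, max_self, List.filter_cons]
          simp [hMm]
        · have hgM : ¬ (g = (rest.map (fun t => t.2.2.2)).foldl max g) := fun h => hMm h.symm
          simp only [List.map_cons, List.foldl_cons, max_self, List.filter_cons]
          simp [hMm, hgM]
      · simp only [List.foldl_cons, if_neg hgt, if_neg heq]
        rw [ih]
        have hmax : max m0 g = m0 := max_eq_left (by omega)
        have hMm0 := pv_foldl_max_ge (rest.map (fun t => t.2.2.2)) m0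
        have hgM : ¬ (g = (rest.map (fun t => t.2.2.2)).foldl max m0) := by omega
        simp only [List.map_cons, List.foldl_cons, hmax, List.filter_cons]
        simp [hgM]

-- ===== VERDICT (by name: the statement is the Claim_ definition above) =====
theorem competizione_con_piu_giudici_spec : Claim_equal_competizione_con_piu_giudici := by
  intro ts _
  unfold Spec_competizione_con_piu_giudici competizione_con_piu_giudici competizione_con_piu_giudici_alt
  rw [pv_foldA_char]
  simp
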